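-- pv_equiv track=rewrite | github.com/MattArwenLangham/advent-of-code | 2023_python/day12/hot_springs.py | get_all_possibilities
-- ===== SOURCE A (Python) =====
-- from itertools import combinations
--
-- def get_all_possibilities(empty_spaces, num_of_groups, sizes):
--     opts = combinations(range(num_of_groups + empty_spaces), num_of_groups)
--     possibility_list = []
--     for opt in opts:
--         possibility = []
--         start = 0
--         for i, pos in enumerate(opt):
--             start += pos
--             if i > 0:
--                start -= opt[i - 1]
--             size = sizes[i]
--             possibility.extend(range(start, start + size))
--             start += size
--         possibility_list.append(possibility)
--     return possibility_list
-- ===== SOURCE B (Python) =====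
-- def get_all_possibilities(empty_spaces, num_of_groups, sizes):
--     result = []
--
--     def place(i, start, budget, acc):
--         if i == num_of_groups:
--             result.append(acc)
--             return
--         for g in range(budget + 1):
--             size = sizes[i]
--             pos = start + g
--             place(i + 1, pos + size + 1, budget - g,
--                   acc + list(range(pos, pos + size)))
--
--     place(0, 0, empty_spaces, [])
--     return result
-- ===== Notes on version B (the rewrite author's own statement) =====
-- stated objective: alternative
-- what changed: Replaces itertools.combinations over index tuples plus an index-arithmetic translation loop by a recursive descent over groups that carries a start position and a remaining gap budget and builds each placement directly during the recursion.
import Mathlib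
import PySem

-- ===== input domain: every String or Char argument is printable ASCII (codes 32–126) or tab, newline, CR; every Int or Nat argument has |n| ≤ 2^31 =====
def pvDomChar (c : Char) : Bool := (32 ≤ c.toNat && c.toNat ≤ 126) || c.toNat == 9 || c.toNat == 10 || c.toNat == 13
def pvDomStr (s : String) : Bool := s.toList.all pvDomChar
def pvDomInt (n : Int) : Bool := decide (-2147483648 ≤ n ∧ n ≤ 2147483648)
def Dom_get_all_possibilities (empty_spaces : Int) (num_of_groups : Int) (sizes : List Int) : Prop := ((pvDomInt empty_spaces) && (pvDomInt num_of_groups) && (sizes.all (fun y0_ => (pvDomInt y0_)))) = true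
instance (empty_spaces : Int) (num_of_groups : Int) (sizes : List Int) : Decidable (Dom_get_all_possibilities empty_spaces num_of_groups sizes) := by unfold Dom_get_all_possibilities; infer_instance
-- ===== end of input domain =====

-- B replaces the combinations-of-indices enumeration by a recursive descent over groups that
-- carries a start index and a remaining gap budget, building each placement directly (alternative
-- decomposition, same enumeration order; equivalence proved on the inputs where A returns).

-- ===== PORT A =====
-- itertools.combinations(l, r): lexicographic r-subsequences (standard recursive
-- characterisation, with the builtin's immediate [] when r exceeds the length — the
-- guard only prunes branches that would recurse to [] anyway, see pvCombos_cons)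
def pvCombos : List Int → Nat → List (List Int)
  | _, 0 => [[]]
  | [], _ + 1 => []
  | x :: xs, k + 1 =>
      if xs.length + 1 < k + 1 then []
      else ((pvCombos xs k).map (fun c => x :: c)) ++ pvCombos xs (k + 1)

-- body of A's inner 'for i, pos in enumerate(opt)' loop; sizes[i] / opt[i-1] via pyGetD
-- (Python raises IndexError out of range: those inputs are excluded by Pre_)
def pvInnerStep (opt sizes : List Int) (st : List Int × Int) (pi : Int × Int) : List Int × Int :=
  let start := st.2 + pi.2
  let start := if pi.1 > 0 then start - PySem.List.pyGetD opt (pi.1 - 1) 0 else start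
  let size := PySem.List.pyGetD sizes pi.1 0
  (st.1 ++ PySem.List.pyRange start (start + size) 1, start + size)

def get_all_possibilities (empty_spaces : Int) (num_of_groups : Int) (sizes : List Int) : List (List Int) :=
  let opts := pvCombos (PySem.List.pyRange 0 (num_of_groups + empty_spaces) 1) num_of_groups.toNat
  opts.foldl (fun possibility_list opt =>
    possibility_list ++ [((PySem.List.enumerate opt 0).foldl (pvInnerStep opt sizes) ([], 0)).1]) []

-- ===== PORT B =====
-- Source B's place(i, start, budget, acc); recursion on the number of groups still to place
def pvPlace (sizes : List Int) : Nat → Int → Int → Int → List Int → List (List Int)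
  | 0, _, _, _, acc => [acc]
  | k + 1, i, start, budget, acc =>
      (PySem.List.pyRange 0 (budget + 1) 1).flatMap (fun g =>
        let size := PySem.List.pyGetD sizes i 0
        let pos := start + g
        pvPlace sizes k (i + 1) (pos + size + 1) (budget - g)
          (acc ++ PySem.List.pyRange pos (pos + size) 1))

def get_all_possibilities_alt (empty_spaces : Int) (num_of_groups : Int) (sizes : List Int) : List (List Int) :=
  pvPlace sizes num_of_groups.toNat 0 0 empty_spaces []

-- ===== PRECONDITION & SPEC =====
-- exactly where A returns: num_of_groups < 0 raises ValueError (combinations with negative r);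
-- with 0 < num_of_groups ≤ num_of_groups + empty_spaces, sizes shorter than num_of_groups raises IndexError
def Pre_get_all_possibilities (empty_spaces : Int) (num_of_groups : Int) (sizes : List Int) : Prop :=
  0 ≤ num_of_groups ∧ (num_of_groups = 0 ∨ empty_spaces < 0 ∨ num_of_groups ≤ (sizes.length : Int))
instance (empty_spaces : Int) (num_of_groups : Int) (sizes : List Int) : Decidable (Pre_get_all_possibilities empty_spaces num_of_groups sizes) := by unfold Pre_get_all_possibilities; infer_instance
def pvWitness_get_all_possibilities : Int × Int × List Int := (2, 2, [1, 2])

def Spec_get_all_possibilities (empty_spaces : Int) (num_of_groups : Int) (sizes : List Int) (out : List (List Int)) : Prop := out = get_all_possibilities_alt empty_spaces num_of_groups sizes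
instance (empty_spaces : Int) (num_of_groups : Int) (sizes : List Int) (out : List (List Int)) : Decidable (Spec_get_all_possibilities empty_spaces num_of_groups sizes out) := by unfold Spec_get_all_possibilities; infer_instance

-- ===== CLAIM (what is proved, stated in full; the proofs are below) =====
def Claim_equal_get_all_possibilities : Prop := ∀ (empty_spaces : Int) (num_of_groups : Int) (sizes : List Int), Dom_get_all_possibilities empty_spaces num_of_groups sizes → Pre_get_all_possibilities empty_spaces num_of_groups sizes → Spec_get_all_possibilities empty_spaces num_of_groups sizes (get_all_possibilities empty_spaces num_of_groups sizes)

-- ===== LEMMAS AND PROOFS =====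

-- the rendering A's inner loop performs, written structurally (prev = previous chosen position)
def pvRend (sizes : List Int) : List Int → Int → Int → Int → List Int
  | [], _, _, _ => []
  | pos :: rest, i, s, prev =>
      let st := s + pos - prev
      let size := PySem.List.pyGetD sizes i 0
      PySem.List.pyRange st (st + size) 1 ++ pvRend sizes rest (i + 1) (st + size) pos

lemma pvCombos_short : ∀ (l : List Int) (k : Nat), l.length < k → pvCombos l k = [] := by
  intro l
  induction l with
  | nil => intro k h; cases k with
    | zero => omega
    | succ k => rfl
  | cons x xs ih =>
      intro k h
      cases k with
      | zero => omega
      | succ k =>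
          simp only [pvCombos, if_pos (show xs.length + 1 < k + 1 by simp at h; omega)]

lemma pvCombos_cons (x : Int) (xs : List Int) (k : Nat) :
    pvCombos (x :: xs) (k + 1) = ((pvCombos xs k).map (fun c => x :: c)) ++ pvCombos xs (k + 1) := by
  by_cases h : xs.length + 1 < k + 1
  · simp only [pvCombos, if_pos h, pvCombos_short xs k (by omega),
      pvCombos_short xs (k + 1) (by omega)]
    simp
  · simp only [pvCombos, if_neg h]

lemma pvCombos_pyRange (k : Nat) : ∀ (lo hi : Int),
    pvCombos (PySem.List.pyRange lo hi 1) (k + 1)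
      = (PySem.List.pyRange lo hi 1).flatMap
          (fun x => (pvCombos (PySem.List.pyRange (x + 1) hi 1) k).map (fun c => x :: c)) := by
  intro lo hi
  by_cases hlt : lo < hi
  · rw [PySem.List.pyRange_one_cons hlt]
    rw [pvCombos_cons]
    simp only [List.flatMap_cons]
    rw [pvCombos_pyRange k (lo + 1) hi]
  · rw [PySem.List.pyRange_one_eq_nil (by omega)]
    rfl
termination_by lo hi => (hi - lo).toNat
decreasing_by omega

lemma pyRange_shift (b lo : Int) :
    PySem.List.pyRange lo (lo + b) 1 = (PySem.List.pyRange 0 b 1).map (fun g => lo + g) := by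
  rw [PySem.List.pyRange_one, PySem.List.pyRange_one]
  simp [List.map_map, Function.comp_def]

lemma fold_rend (sizes : List Int) : ∀ (suf pre P : List Int) (sA s prev : Int),
    s - prev = sA - (if (pre.length : Int) > 0 then PySem.List.pyGetD (pre ++ suf) ((pre.length : Int) - 1) 0 else 0) →
    ((PySem.List.enumerate suf (pre.length : Int)).foldl (pvInnerStep (pre ++ suf) sizes) (P, sA)).1
      = P ++ pvRend sizes suf (pre.length : Int) s prev := by
  intro suf
  induction suf with
  | nil => intro pre P sA s prev _; simp [PySem.List.enumerate_nil, pvRend]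
  | cons pos rest ih =>
      intro pre P sA s prev H
      have hget : PySem.List.pyGetD (pre ++ pos :: rest) ((pre.length : Int)) 0 = pos := by
        rw [PySem.List.pyGetD_natCast]
        simp [List.getD]
      rw [PySem.List.enumerate_cons, List.foldl_cons]
      have hstep : pvInnerStep (pre ++ pos :: rest) sizes (P, sA) ((pre.length : Int), pos)
          = (P ++ PySem.List.pyRange (s + pos - prev)
                ((s + pos - prev) + PySem.List.pyGetD sizes (pre.length : Int) 0) 1,
             (s + pos - prev) + PySem.List.pyGetD sizes (pre.length : Int) 0) := by
        simp only [pvInnerStep]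
        split_ifs at H ⊢ with h
        · have e : sA + pos - PySem.List.pyGetD (pre ++ pos :: rest) ((pre.length : Int) - 1) 0
              = s + pos - prev := by linarith
          rw [e]
        · have e : sA + pos = s + pos - prev := by linarith
          rw [e]
      rw [hstep]
      have hlen : ((pre ++ [pos]).length : Int) = (pre.length : Int) + 1 := by simp
      have hopt : (pre ++ [pos]) ++ rest = pre ++ pos :: rest := by simp
      have H' : ((s + pos - prev) + PySem.List.pyGetD sizes (pre.length : Int) 0) - pos
          = ((s + pos - prev) + PySem.List.pyGetD sizes (pre.length : Int) 0)
            - (if (((pre ++ [pos]).length : Int)) > 0 then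
                 PySem.List.pyGetD ((pre ++ [pos]) ++ rest) (((pre ++ [pos]).length : Int) - 1) 0
               else 0) := by
        rw [if_pos (by rw [hlen]; positivity)]
        rw [hopt, hlen]
        simp only [add_sub_cancel_right]
        rw [hget]
      have := ih (pre ++ [pos])
        (P ++ PySem.List.pyRange (s + pos - prev)
           ((s + pos - prev) + PySem.List.pyGetD sizes (pre.length : Int) 0) 1)
        ((s + pos - prev) + PySem.List.pyGetD sizes (pre.length : Int) 0)
        ((s + pos - prev) + PySem.List.pyGetD sizes (pre.length : Int) 0) pos H'
      rw [hlen, hopt] at this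
      rw [this]
      simp only [pvRend, List.append_assoc]

lemma place_eq (sizes : List Int) : ∀ (k : Nat) (b lo s i : Int) (acc : List Int),
    pvPlace sizes k i (s + 1) b acc
      = (pvCombos (PySem.List.pyRange lo (lo + b + k) 1) k).map
          (fun opt => acc ++ pvRend sizes opt i s (lo - 1)) := by
  intro k
  induction k with
  | zero =>
      intro b lo s i acc
      simp [pvPlace, pvCombos, pvRend]
  | succ k ih =>
      intro b lo s i acc
      by_cases hb : b < 0
      · rw [show pvPlace sizes (k + 1) i (s + 1) b acc
              = (PySem.List.pyRange 0 (b + 1) 1).flatMap (fun g =>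
                  let size := PySem.List.pyGetD sizes i 0
                  let pos := (s + 1) + g
                  pvPlace sizes k (i + 1) (pos + size + 1) (b - g)
                    (acc ++ PySem.List.pyRange pos (pos + size) 1)) from rfl]
        rw [PySem.List.pyRange_one_eq_nil (by omega)]
        rw [pvCombos_short _ (k + 1) (by rw [PySem.List.length_pyRange_one]; omega)]
        simp
      · have hH : lo + b + ((k + 1 : Nat) : Int) = lo + b + k + 1 := by push_cast; ring
        rw [hH]
        rw [pvCombos_pyRange]
        rw [List.map_flatMap]
        rw [PySem.List.pyRange_one_append lo (lo + (b + 1)) (lo + b + k + 1) (by omega) (by omega)]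
        rw [List.flatMap_append]
        have hnil : (PySem.List.pyRange (lo + (b + 1)) (lo + b + k + 1) 1).flatMap
            (fun x => ((pvCombos (PySem.List.pyRange (x + 1) (lo + b + k + 1) 1) k).map
              (fun c => x :: c)).map (fun opt => acc ++ pvRend sizes opt i s (lo - 1))) = [] := by
          rw [List.flatMap_eq_nil_iff]
          intro x hx
          rw [PySem.List.mem_pyRange_one] at hx
          rw [pvCombos_short _ k (by rw [PySem.List.length_pyRange_one]; omega)]
          simp
        rw [hnil, List.append_nil]
        rw [pyRange_shift (b + 1) lo, List.flatMap_map]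
        show pvPlace sizes (k + 1) i (s + 1) b acc = _
        rw [show pvPlace sizes (k + 1) i (s + 1) b acc
              = (PySem.List.pyRange 0 (b + 1) 1).flatMap (fun g =>
                  pvPlace sizes k (i + 1) (((s + 1) + g) + PySem.List.pyGetD sizes i 0 + 1) (b - g)
                    (acc ++ PySem.List.pyRange ((s + 1) + g)
                       (((s + 1) + g) + PySem.List.pyGetD sizes i 0) 1)) from rfl]
        apply List.flatMap_congr
        intro g _
        have e1 : ((s + 1) + g) + PySem.List.pyGetD sizes i 0 + 1
            = (((s + 1) + g) + PySem.List.pyGetD sizes i 0) + 1 := by ring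
        rw [e1, ih (b - g) (lo + g + 1) (((s + 1) + g) + PySem.List.pyGetD sizes i 0) (i + 1)]
        have e2 : lo + g + 1 + (b - g) + (k : Int) = lo + b + k + 1 := by ring
        rw [e2]
        rw [List.map_map]
        apply List.map_congr_left
        intro opt _
        simp only [Function.comp_apply, pvRend]
        have e3 : s + (lo + g) - (lo - 1) = (s + 1) + g := by ring
        have e4 : lo + g + 1 - 1 = lo + g := by ring
        rw [e3, e4]
        simp [List.append_assoc]

lemma foldl_snoc (f : List Int → List Int) : ∀ (l : List (List Int)) (acc : List (List Int)),
    l.foldl (fun a x => a ++ [f x]) acc = acc ++ l.map f := by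
  intro l
  induction l with
  | nil => simp
  | cons x xs ih => intro acc; simp [List.foldl, ih]

-- ===== VERDICT (by name: the statement is the Claim_ definition above) =====
theorem get_all_possibilities_spec : Claim_equal_get_all_possibilities := by
  intro empty_spaces num_of_groups sizes _ hpre
  obtain ⟨hn, -⟩ := hpre
  show get_all_possibilities empty_spaces num_of_groups sizes
      = get_all_possibilities_alt empty_spaces num_of_groups sizes
  simp only [get_all_possibilities, get_all_possibilities_alt]
  rw [foldl_snoc, List.nil_append]
  have hB := place_eq sizes num_of_groups.toNat empty_spaces 0 (-1) 0 []
  rw [show (-1 : Int) + 1 = 0 from by ring] at hB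
  rw [hB]
  have hcast : (0 : Int) + empty_spaces + (num_of_groups.toNat : Int)
      = num_of_groups + empty_spaces := by omega
  rw [hcast]
  apply List.map_congr_left
  intro opt _
  have hf := fold_rend sizes opt [] [] 0 (-1) (-1) (by norm_num)
  simp only [List.nil_append, List.length_nil, Nat.cast_zero] at hf
  rw [hf]
  norm_num
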